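-- pv_equiv track=rewrite | github.com/ijleesw/data-compression | src/lz_family/utils.py | getLargestPrefixPointer
-- ===== SOURCE A (Python) =====
-- def getLargestPrefixPointer(txt, dic):
--
--     largestPref = ""
--     pointer = 0
--     for key, val in dic.items():
--         if((txt.startswith(key)) and (len(key) > len(largestPref)) and (len(txt) - len(key) > 0)):
--             largestPref = key
--             pointer = val
--
--     return (largestPref, pointer)
-- ===== SOURCE B (Python) =====
-- def getLargestPrefixPointer(txt, dic):
--     # Try txt's proper prefixes longest-first (no prefix longer than the longest
--     # key can match); the first one present in dic wins.
--     maxlen = max(map(len, dic), default=0)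
--     for k in range(min(len(txt) - 1, maxlen), 0, -1):
--         pref = txt[:k]
--         if pref in dic:
--             return (pref, dic[pref])
--     return ("", 0)
-- ===== Notes on version B (the rewrite author's own statement) =====
-- stated objective: alternative
-- what changed: Instead of scanning every dictionary key and testing it with startswith against txt, B takes the longest key length in one pass and then probes txt's proper prefixes longest-first by hash lookup, so no key is ever string-compared against txt; measured ~1.2-1.3x faster, below the 1.5x bar.
import Mathlib
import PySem

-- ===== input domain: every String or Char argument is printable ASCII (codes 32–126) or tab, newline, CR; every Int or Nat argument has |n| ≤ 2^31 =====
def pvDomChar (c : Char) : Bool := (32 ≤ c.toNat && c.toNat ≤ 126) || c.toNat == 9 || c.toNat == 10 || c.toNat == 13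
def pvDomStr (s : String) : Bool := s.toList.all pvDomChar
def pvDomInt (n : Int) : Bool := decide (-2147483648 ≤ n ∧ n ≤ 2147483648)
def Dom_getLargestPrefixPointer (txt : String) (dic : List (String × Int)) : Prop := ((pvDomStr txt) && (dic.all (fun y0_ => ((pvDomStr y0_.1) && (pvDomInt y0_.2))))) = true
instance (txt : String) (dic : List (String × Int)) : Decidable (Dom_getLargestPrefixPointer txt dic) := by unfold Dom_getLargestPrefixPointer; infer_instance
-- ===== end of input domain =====

-- B scans txt's proper prefixes longest-first (capped by the longest key) with a dict lookup instead of testing every dict key against txt.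

-- ===== PORT A =====
-- loop body of A's 'for key, val in dic.items(): if txt.startswith(key) and …'
def pvStepA (txt : String) (acc kv : String × Int) : String × Int :=
  if PySem.Str.startswith txt kv.1 = true ∧
      PySem.Str.len kv.1 > PySem.Str.len acc.1 ∧
      PySem.Str.len txt - PySem.Str.len kv.1 > 0 then
    (kv.1, kv.2)
  else acc

def getLargestPrefixPointer (txt : String) (dic : List (String × Int)) : String × Int :=
  (PySem.Dict.ofList dic).items.foldl (pvStepA txt) ("", 0)

-- ===== PORT B =====
-- txt[:j]
def pvPref (txt : String) (j : Nat) : String := PySem.Str.slice txt none (some (j : Int))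

-- B's 'for k in range(min(len(txt)-1, maxlen), 0, -1)' loop with its early return, counting down
def pvPrefLoop (txt : String) (d : PySem.Dict String Int) : Nat → String × Int
  | 0 => ("", 0)
  | k + 1 =>
      let pref := pvPref txt (k + 1)
      if d.contains pref then (pref, d.getD pref 0) else pvPrefLoop txt d k

def getLargestPrefixPointer_alt (txt : String) (dic : List (String × Int)) : String × Int :=
  let d := PySem.Dict.ofList dic
  let maxlen : Int := (PySem.List.max? (d.keys.map PySem.Str.len) (fun x => x)).getD 0
  pvPrefLoop txt d (min (PySem.Str.len txt - 1) maxlen).toNat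

-- ===== PRECONDITION & SPEC =====
def Spec_getLargestPrefixPointer (txt : String) (dic : List (String × Int)) (out : String × Int) : Prop := out = getLargestPrefixPointer_alt txt dic
instance (txt : String) (dic : List (String × Int)) (out : String × Int) : Decidable (Spec_getLargestPrefixPointer txt dic out) := by unfold Spec_getLargestPrefixPointer; infer_instance

-- ===== CLAIM (what is proved, stated in full; the proofs are below) =====
def Claim_equal_getLargestPrefixPointer : Prop := ∀ (txt : String) (dic : List (String × Int)), Dom_getLargestPrefixPointer txt dic → Spec_getLargestPrefixPointer txt dic (getLargestPrefixPointer txt dic)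

-- ===== LEMMAS AND PROOFS =====

-- the selection condition of A, phrased over character lists
abbrev pvMatch (txt k : String) : Prop :=
  k.toList <+: txt.toList ∧ k.toList.length < txt.toList.length

theorem pvPref_toList (txt : String) (j : Nat) :
    (pvPref txt j).toList = txt.toList.take j := by
  simp [pvPref, PySem.Str.toList_slice, PySem.Chars.slice_eq_listSlice,
    PySem.List.slice_to_natCast]

theorem pvStepA_eq (txt : String) (acc kv : String × Int) :
    pvStepA txt acc kv =
      if pvMatch txt kv.1 ∧ acc.1.toList.length < kv.1.toList.length then kv else acc := by
  have h : (PySem.Str.startswith txt kv.1 = true ∧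
      PySem.Str.len kv.1 > PySem.Str.len acc.1 ∧
      PySem.Str.len txt - PySem.Str.len kv.1 > 0) ↔
      (pvMatch txt kv.1 ∧ acc.1.toList.length < kv.1.toList.length) := by
    rw [PySem.Str.startswith_eq, PySem.Chars.startswith_iff]
    simp only [pvMatch, PySem.Str.len_eq]
    constructor
    · rintro ⟨h1, h2, h3⟩; exact ⟨⟨h1, by omega⟩, by omega⟩
    · rintro ⟨⟨h1, h2⟩, h3⟩; exact ⟨h1, by omega, by omega⟩
  simp only [pvStepA, h]

-- invariant of A's fold: the accumulator only grows, the result is either the start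
-- accumulator or a strictly longer matching entry of the list, and it dominates every match
theorem pvFoldA (txt : String) (l : List (String × Int)) (p : String × Int) :
    (l.foldl (pvStepA txt) p = p ∨
      (l.foldl (pvStepA txt) p ∈ l ∧ pvMatch txt (l.foldl (pvStepA txt) p).1 ∧
        p.1.toList.length < (l.foldl (pvStepA txt) p).1.toList.length)) ∧
    p.1.toList.length ≤ (l.foldl (pvStepA txt) p).1.toList.length ∧
    ∀ kw ∈ l, pvMatch txt kw.1 → kw.1.toList.length ≤ (l.foldl (pvStepA txt) p).1.toList.length := by
  induction l generalizing p with
  | nil => simp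
  | cons kv t ih =>
    rw [List.foldl_cons, pvStepA_eq]
    by_cases h : pvMatch txt kv.1 ∧ p.1.toList.length < kv.1.toList.length
    · rw [if_pos h]
      obtain ⟨ih1, ih2, ih3⟩ := ih kv
      refine ⟨?_, by omega, ?_⟩
      · rcases ih1 with h1 | ⟨h1, h2, h3⟩
        · exact Or.inr ⟨by rw [h1]; exact List.mem_cons_self, by rw [h1]; exact h.1, by rw [h1]; exact h.2⟩
        · exact Or.inr ⟨List.mem_cons_of_mem _ h1, h2, by omega⟩
      · intro kw hkw hm
        rcases List.mem_cons.mp hkw with h1 | h1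
        · subst h1; omega
        · exact ih3 kw h1 hm
    · rw [if_neg h]
      obtain ⟨ih1, ih2, ih3⟩ := ih p
      refine ⟨?_, ih2, ?_⟩
      · rcases ih1 with h1 | ⟨h1, h2, h3⟩
        · exact Or.inl h1
        · exact Or.inr ⟨List.mem_cons_of_mem _ h1, h2, h3⟩
      · intro kw hkw hm
        rcases List.mem_cons.mp hkw with h1 | h1
        · subst h1
          by_cases hl : kw.1.toList.length ≤ p.1.toList.length
          · omega
          · exact absurd ⟨hm, by omega⟩ h
        · exact ih3 kw h1 hm

theorem pvLoop_of_none (txt : String) (d : PySem.Dict String Int) (m : Nat)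
    (h : ∀ j, 1 ≤ j → j ≤ m → d.contains (pvPref txt j) = false) :
    pvPrefLoop txt d m = ("", 0) := by
  induction m with
  | zero => rfl
  | succ k ih =>
    have hc : d.contains (pvPref txt (k + 1)) = false := h _ (by omega) le_rfl
    simp only [pvPrefLoop, hc]
    simp only [Bool.false_eq_true, if_false]
    exact ih fun j h1 h2 => h j h1 (by omega)

theorem pvLoop_of_best (txt : String) (d : PySem.Dict String Int) (m j : Nat)
    (h1 : 1 ≤ j) (h2 : j ≤ m) (hc : d.contains (pvPref txt j) = true)
    (hmax : ∀ i, j < i → i ≤ m → d.contains (pvPref txt i) = false) :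
    pvPrefLoop txt d m = (pvPref txt j, d.getD (pvPref txt j) 0) := by
  induction m with
  | zero => omega
  | succ k ih =>
    by_cases hj : j = k + 1
    · subst hj
      simp only [pvPrefLoop, hc, if_true]
    · have hne : d.contains (pvPref txt (k + 1)) = false := hmax _ (by omega) le_rfl
      simp only [pvPrefLoop, hne, Bool.false_eq_true, if_false]
      exact ih (by omega) fun i hi1 hi2 => hmax i hi1 (by omega)

-- a matching key present in the dict is exactly txt[:its length]
theorem pvMatch_pref (txt : String) {k : String} (h : pvMatch txt k) :
    pvPref txt k.toList.length = k := by
  apply String.toList_injective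
  rw [pvPref_toList]
  exact (List.prefix_iff_eq_take.mp h.1).symm

theorem pvMem_contains (d : PySem.Dict String Int) {kw : String × Int}
    (h : kw ∈ d.items) : d.contains kw.1 = true := by
  rw [PySem.Dict.contains_eq_decide_mem_keys]
  exact decide_eq_true (PySem.Dict.mem_keys_of_mem_items d h)

theorem pvLoop_drop (txt : String) (d : PySem.Dict String Int) (m m' : Nat)
    (hle : m' ≤ m) (h : ∀ j, m' < j → j ≤ m → d.contains (pvPref txt j) = false) :
    pvPrefLoop txt d m = pvPrefLoop txt d m' := by
  induction m with
  | zero => have h0 : m' = 0 := by omega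
            rw [h0]
  | succ k ih =>
    rcases Nat.eq_or_lt_of_le hle with heq | hlt
    · rw [heq]
    · have hc := h (k + 1) (by omega) le_rfl
      simp only [pvPrefLoop, hc, Bool.false_eq_true, if_false]
      exact ih (by omega) fun j hj1 hj2 => h j hj1 (by omega)

-- the cap by the longest key drops only prefix lengths no key can have
theorem pvAlt_eq_loop (txt : String) (dic : List (String × Int)) :
    getLargestPrefixPointer_alt txt dic =
      pvPrefLoop txt (PySem.Dict.ofList dic) (PySem.Str.len txt - 1).toNat := by
  unfold getLargestPrefixPointer_alt
  set d := PySem.Dict.ofList dic with hd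
  set maxlen : Int := (PySem.List.max? (d.keys.map PySem.Str.len) (fun x => x)).getD 0 with hml
  have hL : PySem.Str.len txt = (txt.toList.length : Int) := PySem.Str.len_eq txt
  refine (pvLoop_drop txt d _ _ ?_ ?_).symm
  · omega
  · intro j hj1 hj2
    by_contra hcon
    have hct : d.contains (pvPref txt j) = true := by simpa using hcon
    have hmem : pvPref txt j ∈ d.keys := by
      rw [PySem.Dict.contains_eq_decide_mem_keys] at hct
      exact of_decide_eq_true hct
    have hmemlen : PySem.Str.len (pvPref txt j) ∈ d.keys.map PySem.Str.len :=
      List.mem_map_of_mem hmem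
    have hjlen : PySem.Str.len (pvPref txt j) = (j : Int) := by
      rw [PySem.Str.len_eq, pvPref_toList]
      simp only [List.length_take]
      omega
    cases hmax : PySem.List.max? (d.keys.map PySem.Str.len) (fun x => x) with
    | none =>
      rw [PySem.List.max?_eq_none_iff] at hmax
      rw [hmax] at hmemlen
      simp at hmemlen
    | some M =>
      have hle2 : PySem.Str.len (pvPref txt j) ≤ M :=
        PySem.List.max?_isMax hmax _ hmemlen
      have hMl : maxlen = M := by rw [hml, hmax]; rfl
      have hjI : (j : Int) ≤ min (PySem.Str.len txt - 1) maxlen := by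
        rw [hjlen] at hle2
        rw [hMl]
        refine le_min ?_ hle2
        omega
      have := Int.toNat_le_toNat hjI
      omega

-- ===== VERDICT (by name: the statement is the Claim_ definition above) =====
theorem getLargestPrefixPointer_spec : Claim_equal_getLargestPrefixPointer := by
  unfold Claim_equal_getLargestPrefixPointer Spec_getLargestPrefixPointer
  intro txt dic _
  unfold getLargestPrefixPointer
  rw [pvAlt_eq_loop txt dic]
  set d := PySem.Dict.ofList dic with hd
  have hn : d.keys.Nodup := PySem.Dict.nodup_keys_ofList dic
  set m : Nat := (PySem.Str.len txt - 1).toNat with hmdef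
  have hm : m = txt.toList.length - 1 := by
    rw [hmdef, PySem.Str.len_eq]; omega
  obtain ⟨h1, h2, h3⟩ := pvFoldA txt d.items ("", 0)
  set r := d.items.foldl (pvStepA txt) ("", 0) with hr
  -- every matching entry of d yields a good prefix length
  have hgood : ∀ kw : String × Int, kw ∈ d.items → pvMatch txt kw.1 → 1 ≤ kw.1.toList.length →
      1 ≤ kw.1.toList.length ∧ kw.1.toList.length ≤ m ∧
        d.contains (pvPref txt kw.1.toList.length) = true := by
    intro kw hkw hmt h1l
    refine ⟨h1l, by omega, ?_⟩
    rw [pvMatch_pref txt hmt]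
    exact pvMem_contains d hkw
  by_cases hex : ∃ j, (d.contains (pvPref txt j) = true ∧ 1 ≤ j) ∧ j ≤ m
  · obtain ⟨j, hj, hjm⟩ := hex
    set P : Nat → Prop := fun i => d.contains (pvPref txt i) = true ∧ 1 ≤ i with hP
    set js := Nat.findGreatest P m with hjs
    have hPjs : P js := Nat.findGreatest_spec hjm hj
    have hjsle : js ≤ m := Nat.findGreatest_le m
    have hjsmax : ∀ i, js < i → i ≤ m → d.contains (pvPref txt i) = false := by
      intro i hi1 hi2
      have := Nat.findGreatest_is_greatest hi1 hi2
      rw [hP] at this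
      by_contra hcon
      exact this ⟨by simpa using hcon, by omega⟩
    rw [pvLoop_of_best txt d m js hPjs.2 hjsle hPjs.1 hjsmax]
    -- the witness entry for length js
    have hcon := hPjs.1
    rw [PySem.Dict.contains_eq_isSome_get?] at hcon
    obtain ⟨w, hw⟩ := Option.isSome_iff_exists.mp hcon
    have hwmem : (pvPref txt js, w) ∈ d.items :=
      (PySem.Dict.get?_eq_some_iff_mem_items d _ w hn).mp hw
    have hpreflen : (pvPref txt js).toList.length = js := by
      rw [pvPref_toList]
      simp only [List.length_take]
      omega
    have hwmatch : pvMatch txt (pvPref txt js) := by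
      constructor
      · rw [pvPref_toList]; exact List.take_prefix _ _
      · rw [hpreflen]; omega
    have hge : js ≤ r.1.toList.length := by
      have := h3 (pvPref txt js, w) hwmem hwmatch
      simpa [hpreflen] using this
    rcases h1 with hcase | ⟨hrm, hrmatch, hrlen⟩
    · exfalso
      have : r.1.toList.length = 0 := by rw [hcase]; rfl
      omega
    · simp only at hrlen
      have hrl1 : 1 ≤ r.1.toList.length := by
        simpa using hrlen
      obtain ⟨hg1, hg2, hg3⟩ := hgood r hrm hrmatch hrl1
      have hle : r.1.toList.length ≤ js := by
        by_contra hcon2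
        have := hjsmax r.1.toList.length (by omega) hg2
        rw [this] at hg3
        exact absurd hg3 (by simp)
      have heq : r.1.toList.length = js := le_antisymm hle hge
      have hkey : pvPref txt js = r.1 := by
        rw [← heq]; exact pvMatch_pref txt hrmatch
      have hval : r.2 = w := by
        have : d.get? r.1 = some r.2 :=
          (PySem.Dict.get?_eq_some_iff_mem_items d _ _ hn).mpr (by simpa using hrm)
        rw [← hkey] at this
        rw [hw] at this
        exact (Option.some_inj.mp this).symm
      have hgd : d.getD (pvPref txt js) 0 = w :=
        PySem.Dict.getD_of_mem_items d hwmem hn 0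
      rw [hgd, hkey, ← hval]
  · push_neg at hex
    rw [pvLoop_of_none txt d m (by
      intro j hj1 hj2
      by_contra hcon
      exact absurd hj2 (by
        have : d.contains (pvPref txt j) = true := by simpa using hcon
        have := hex j ⟨this, hj1⟩
        omega))]
    rcases h1 with hcase | ⟨hrm, hrmatch, hrlen⟩
    · exact hcase
    · exfalso
      have hrl1 : 1 ≤ r.1.toList.length := by simpa using hrlen
      obtain ⟨hg1, hg2, hg3⟩ := hgood r hrm hrmatch hrl1
      exact absurd hg2 (by
        have := hex r.1.toList.length ⟨hg3, hg1⟩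
        omega)
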